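-- pv_equiv track=rewrite | github.com/quinn-jenkins/advent-of-code-24 | python/day15/day15.py | create_part_two_warehouse
-- ===== SOURCE A (Python) =====
-- WALL = "#"
--
-- BOX = "O"
--
-- BOX_L = "["
--
-- BOX_R = "]"
--
-- EMPTY = "."
--
-- ROBOT = "@"
--
-- def create_part_two_warehouse(warehouse: list) -> list:
--     for i, row in enumerate(warehouse):
--         row = row.replace(WALL, WALL+WALL)
--         row = row.replace(BOX, BOX_L+BOX_R)
--         row = row.replace(EMPTY, EMPTY+EMPTY)
--         row = row.replace(ROBOT, ROBOT+EMPTY)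
--         warehouse[i] = row
--     return warehouse
-- ===== SOURCE B (Python) =====
-- _EXPAND = {"#": "##", "O": "[]", ".": "..", "@": "@."}
--
-- def create_part_two_warehouse(warehouse: list) -> list:
--     for i, row in enumerate(warehouse):
--         warehouse[i] = "".join(_EXPAND.get(c, c) for c in row)
--     return warehouse
-- ===== Notes on version B (the rewrite author's own statement) =====
-- stated objective: idiomatic
-- what changed: Replaces four sequential full-string replace() scans per row with a single table-driven character pass joining each char's fixed two-char expansion.
import Mathlib
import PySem

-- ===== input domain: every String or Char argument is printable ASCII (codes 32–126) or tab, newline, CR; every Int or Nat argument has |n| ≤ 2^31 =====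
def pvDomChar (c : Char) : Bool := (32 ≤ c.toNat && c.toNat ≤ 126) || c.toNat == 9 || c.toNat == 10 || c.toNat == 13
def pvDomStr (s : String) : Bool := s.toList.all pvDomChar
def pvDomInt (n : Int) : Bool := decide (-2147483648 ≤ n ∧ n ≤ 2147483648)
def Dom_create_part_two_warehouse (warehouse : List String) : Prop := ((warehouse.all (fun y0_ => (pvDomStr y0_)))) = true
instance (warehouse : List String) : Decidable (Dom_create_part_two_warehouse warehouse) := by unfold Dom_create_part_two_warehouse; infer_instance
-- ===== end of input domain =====

-- B replaces A's four sequential full-row replace() scans with one table-driven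
-- character pass per row (idiomatic); like A, B mutates the list in place in Python —
-- the equivalence proved here is about the return value only.


-- ===== PORT A =====
-- A: for each row, the four replace() passes in order, stored back into the list.
def create_part_two_warehouse (warehouse : List String) : List String :=
  warehouse.map (fun row =>
    let row := PySem.Str.replace row "#" "##"
    let row := PySem.Str.replace row "O" "[]"
    let row := PySem.Str.replace row "." ".."
    let row := PySem.Str.replace row "@" "@."
    row)

-- ===== PORT B =====
-- B: fixed expansion table (the dict _EXPAND), one character pass per row via .get(c, c).
def pvExpandTable : PySem.Dict Char (List Char) :=
  PySem.Dict.empty.insert '#' ['#','#'] |>.insert 'O' ['[',']']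
    |>.insert '.' ['.','.'] |>.insert '@' ['@','.']

def pvExpand (c : Char) : List Char := pvExpandTable.getD c [c]

def create_part_two_warehouse_alt (warehouse : List String) : List String :=
  warehouse.map (fun row => String.ofList (row.toList.flatMap pvExpand))

-- ===== PRECONDITION & SPEC =====
def Spec_create_part_two_warehouse (warehouse : List String) (out : List String) : Prop := out = create_part_two_warehouse_alt warehouse
instance (warehouse : List String) (out : List String) : Decidable (Spec_create_part_two_warehouse warehouse out) := by unfold Spec_create_part_two_warehouse; infer_instance

-- ===== CLAIM (what is proved, stated in full; the proofs are below) =====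
def Claim_equal_create_part_two_warehouse : Prop := ∀ (warehouse : List String), Dom_create_part_two_warehouse warehouse → Spec_create_part_two_warehouse warehouse (create_part_two_warehouse warehouse)

-- ===== LEMMAS AND PROOFS =====

-- the single-char substitution each replace() pass performs
def pvSub (a : Char) (rep : List Char) (x : Char) : List Char := if x = a then rep else [x]

-- replace with a single-character pattern is a flatMap over the characters
theorem go_single (a : Char) (rep : List Char) :
    ∀ (l : List Char) (fuel : Nat) (acc : List Char), l.length ≤ fuel →
      PySem.Chars.replace.go [a] rep fuel l acc
        = acc.reverse ++ l.flatMap (pvSub a rep) := by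
  intro l
  induction l with
  | nil =>
      intro fuel acc _
      rw [PySem.Chars.replace.go.eq_def]
      cases fuel <;> simp
  | cons c t ih =>
      intro fuel acc h
      cases fuel with
      | zero => simp at h
      | succ n =>
        rw [PySem.Chars.replace.go.eq_def]
        simp only [List.length_cons, Nat.succ_le_succ_iff] at h
        by_cases hc : c = a
        · subst hc
          simp [List.isPrefixOf, ih n (rep.reverse ++ acc) h, pvSub]
        · simp [List.isPrefixOf, beq_iff_eq, Ne.symm hc, ih n (c :: acc) h, pvSub, hc]

theorem replace_single (a : Char) (rep : List Char) (l : List Char) :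
    PySem.Chars.replace l [a] rep = l.flatMap (pvSub a rep) := by
  unfold PySem.Chars.replace
  simpa using go_single a rep l l.length [] le_rfl

-- the four per-character substitutions composed equal one table lookup
theorem expand_eq_chain (x : Char) :
    List.flatMap
        (fun y =>
          List.flatMap (fun z => List.flatMap (pvSub '@' ['@','.']) (pvSub '.' ['.','.'] z))
            (pvSub 'O' ['[',']'] y))
        (pvSub '#' ['#','#'] x) = pvExpand x := by
  by_cases h1 : x = '#'
  · subst h1; rfl
  by_cases h2 : x = 'O'
  · subst h2; rfl
  by_cases h3 : x = '.'
  · subst h3; rfl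
  by_cases h4 : x = '@'
  · subst h4; rfl
  have e1 : ('#' == x) = false := by simp [Ne.symm h1]
  have e2 : ('O' == x) = false := by simp [Ne.symm h2]
  have e3 : ('.' == x) = false := by simp [Ne.symm h3]
  have e4 : ('@' == x) = false := by simp [Ne.symm h4]
  simp [pvSub, h1, h2, h3, h4, pvExpand, pvExpandTable, PySem.Dict.getD,
    PySem.Dict.get?, PySem.Dict.insert, PySem.Dict.empty, List.find?, e1, e2, e3, e4]

-- the per-row equality
theorem row_eq (row : String) :
    (PySem.Str.replace (PySem.Str.replace (PySem.Str.replace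
        (PySem.Str.replace row "#" "##") "O" "[]") "." "..") "@" "@.")
      = String.ofList (row.toList.flatMap pvExpand) := by
  rw [← String.toList_inj]
  have t1 : ("#" : String).toList = ['#'] := rfl
  have t2 : ("##" : String).toList = ['#','#'] := rfl
  have t3 : ("O" : String).toList = ['O'] := rfl
  have t4 : ("[]" : String).toList = ['[',']'] := rfl
  have t5 : ("." : String).toList = ['.'] := rfl
  have t6 : (".." : String).toList = ['.','.'] := rfl
  have t7 : ("@" : String).toList = ['@'] := rfl
  have t8 : ("@." : String).toList = ['@','.'] := rfl
  simp only [PySem.Str.toList_replace, String.toList_ofList, t1, t2, t3, t4, t5, t6, t7, t8]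
  rw [replace_single, replace_single, replace_single, replace_single,
    List.flatMap_assoc, List.flatMap_assoc, List.flatMap_assoc]
  exact List.flatMap_congr (fun x _ => expand_eq_chain x)

-- ===== VERDICT (by name: the statement is the Claim_ definition above) =====
theorem create_part_two_warehouse_spec : Claim_equal_create_part_two_warehouse := by
  intro warehouse _
  unfold Spec_create_part_two_warehouse create_part_two_warehouse create_part_two_warehouse_alt
  exact List.map_congr_left (fun row _ => row_eq row)
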